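-- pv_equiv track=rewrite | github.com/borjaocerin/TFM | modelos/services/predict.py | _normalize_text_basic
-- ===== SOURCE A (Python) =====
-- import unicodedata
-- from typing import Any
--
-- def _normalize_text_basic(value: Any) -> str:
--     text = str(value or "").strip().lower()
--     if text == "":
--         return ""
--     text = unicodedata.normalize("NFKD", text)
--     text = "".join(char for char in text if not unicodedata.combining(char))
--     for token in [".", ",", ";", ":", "'", '"', "-", "_"]:
--         text = text.replace(token, " ")
--     return " ".join(text.split())
-- ===== SOURCE B (Python) =====
-- import unicodedata
-- from typing import Any
--
-- _PUNCT = {".", ",", ";", ":", "'", '"', "-", "_"}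
--
-- def _normalize_text_basic(value: Any) -> str:
--     text = str(value or "").strip().lower()
--     if text == "":
--         return ""
--     text = unicodedata.normalize("NFKD", text)
--     tokens = []
--     buf = []
--     for ch in text:
--         if unicodedata.combining(ch):
--             continue
--         if ch in _PUNCT or ch.isspace():
--             if buf:
--                 tokens.append("".join(buf))
--                 buf = []
--         else:
--             buf.append(ch)
--     if buf:
--         tokens.append("".join(buf))
--     return " ".join(tokens)
-- ===== Notes on version B (the rewrite author's own statement) =====
-- stated objective: simpler
-- what changed: Replaced the combining-mark filter pass, eight sequential str.replace passes and the final split()/join() with a single character-by-character pass that flushes a token buffer on punctuation/whitespace.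
import Mathlib
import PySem

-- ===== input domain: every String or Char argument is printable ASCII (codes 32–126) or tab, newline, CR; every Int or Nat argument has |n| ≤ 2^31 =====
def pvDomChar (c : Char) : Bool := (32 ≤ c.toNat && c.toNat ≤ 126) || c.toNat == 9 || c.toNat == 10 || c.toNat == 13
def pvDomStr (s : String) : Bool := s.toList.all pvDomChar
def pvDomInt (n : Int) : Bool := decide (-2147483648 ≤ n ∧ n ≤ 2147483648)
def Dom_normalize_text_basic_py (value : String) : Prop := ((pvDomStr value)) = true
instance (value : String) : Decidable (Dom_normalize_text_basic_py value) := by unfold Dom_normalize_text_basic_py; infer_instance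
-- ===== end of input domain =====

-- B replaces the eight sequential replace passes + split/join of A with a single
-- character pass flushing a token buffer; objective: simpler (one pass, same result).


-- ===== PORT A =====
-- `unicodedata.normalize("NFKD", text)`: identity on the ASCII domain (no ASCII char decomposes); exact on Dom.
def pyNFKD (s : String) : String := s
-- `unicodedata.combining(char) != 0`: false for every ASCII char (combining classes start at U+0300); exact on Dom.
def pyCombining (_c : Char) : Bool := false

-- `str(value or "")` is `value` itself for a string argument ("" stays ""), so the port starts from `value`.
def normalize_text_basic_py (value : String) : String :=
  let text := PySem.Str.lower (PySem.Str.strip value)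
  if text = "" then ""
  else
    let text1 := pyNFKD text
    let text2 := String.ofList (text1.toList.filter (fun c => !pyCombining c))
    let text3 := [".", ",", ";", ":", "'", "\"", "-", "_"].foldl
      (fun t tok => PySem.Str.replace t tok " ") text2
    PySem.Str.join " " (PySem.Str.split₀ text3)

-- ===== PORT B =====
def pvPunct : List Char := ['.', ',', ';', ':', '\'', '"', '-', '_']

-- the single pass: tokens accumulated in order, current buffer appended char by char
def pvAltGo : List Char → List String → List Char → List String
  | [], toks, buf => if buf.isEmpty then toks else toks ++ [String.ofList buf]
  | c :: rest, toks, buf =>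
    if pyCombining c then pvAltGo rest toks buf
    else if c ∈ pvPunct || PySem.Chars.isspace c then
      if buf.isEmpty then pvAltGo rest toks [] else pvAltGo rest (toks ++ [String.ofList buf]) []
    else pvAltGo rest toks (buf ++ [c])

def normalize_text_basic_py_alt (value : String) : String :=
  let text := PySem.Str.lower (PySem.Str.strip value)
  if text = "" then ""
  else
    let text1 := pyNFKD text
    PySem.Str.join " " (pvAltGo text1.toList [] [])

-- ===== PRECONDITION & SPEC =====
def Spec_normalize_text_basic_py (value : String) (out : String) : Prop := out = normalize_text_basic_py_alt value
instance (value : String) (out : String) : Decidable (Spec_normalize_text_basic_py value out) := by unfold Spec_normalize_text_basic_py; infer_instance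

-- ===== CLAIM (what is proved, stated in full; the proofs are below) =====
def Claim_equal_normalize_text_basic_py : Prop := ∀ (value : String), Dom_normalize_text_basic_py value → Spec_normalize_text_basic_py value (normalize_text_basic_py value)

-- ===== LEMMAS AND PROOFS =====

-- single-character replace is a map
lemma pv_replace_go_single (o n : Char) : ∀ (cs : List Char) (fuel : Nat) (acc : List Char),
    cs.length ≤ fuel →
    PySem.Chars.replace.go [o] [n] fuel cs acc
      = acc.reverse ++ cs.map (fun c => if c = o then n else c) := by
  intro cs
  induction cs with
  | nil =>
    intro fuel acc _
    cases fuel <;> simp [PySem.Chars.replace.go]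
  | cons c t ih =>
    intro fuel acc hle
    cases fuel with
    | zero => simp at hle
    | succ f =>
      simp only [List.length_cons] at hle
      simp only [PySem.Chars.replace.go, List.isPrefixOf, Bool.and_true]
      by_cases hco : o = c
      · subst hco
        simp only [beq_self_eq_true, if_true, List.length_singleton, List.drop_succ_cons,
          List.drop_zero, List.reverse_singleton, List.singleton_append]
        rw [ih f (n :: acc) (by omega)]
        simp
      · have hbe : (o == c) = false := by simp [hco]
        simp only [hbe, Bool.false_eq_true, if_false]
        rw [ih f (c :: acc) (by omega)]
        simp [if_neg (fun h : c = o => hco h.symm)]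

lemma pv_replace_single (o n : Char) (cs : List Char) :
    PySem.Chars.replace cs [o] [n] = cs.map (fun c => if c = o then n else c) := by
  have h := pv_replace_go_single o n cs cs.length [] le_rfl
  simpa [PySem.Chars.replace] using h

-- folding the single-char replaces over the punctuation list is one map
lemma pv_foldl_replace_eq_map : ∀ (os : List Char) (cs : List Char),
    os.foldl (fun l o => PySem.Chars.replace l [o] [' ']) cs
      = cs.map (fun c => if c ∈ os then ' ' else c) := by
  intro os
  induction os with
  | nil => intro cs; simp
  | cons o os ih =>
    intro cs
    rw [List.foldl_cons, pv_replace_single, ih, List.map_map]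
    apply List.map_congr_left
    intro c _
    by_cases hc : c = o
    · subst hc; simp
    · simp [hc]

-- the String-level foldl of Str.replace, seen through toList
lemma pv_foldl_str_replace_toList : ∀ (toks : List String) (t : String),
    (toks.foldl (fun t tok => PySem.Str.replace t tok " ") t).toList
      = toks.foldl (fun l tok => PySem.Chars.replace l tok.toList [' ']) t.toList := by
  intro toks
  induction toks with
  | nil => intro t; rfl
  | cons tok toks ih =>
    intro t
    simp only [List.foldl_cons, ih, PySem.Str.toList_replace]
    rfl

-- the split₀ worker over the punctuation-replaced text IS the one-pass worker
lemma pv_split_go_eq_altGo : ∀ (cs buf : List Char) (toks : List String),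
    PySem.Chars.split₀.go (cs.map (fun c => if c ∈ pvPunct then ' ' else c))
        buf.reverse ((toks.map String.toList).reverse)
      = (pvAltGo cs toks buf).map String.toList := by
  intro cs
  induction cs with
  | nil =>
    intro buf toks
    simp only [List.map_nil, PySem.Chars.split₀.go, pvAltGo]
    by_cases hb : buf.isEmpty
    · simp [List.isEmpty_iff.mp hb]
    · simp [hb]
  | cons c rest ih =>
    intro buf toks
    simp only [List.map_cons, pvAltGo, pyCombining, Bool.false_eq_true, if_false]
    by_cases hp : c ∈ pvPunct
    · have hs : PySem.Chars.isspace ' ' = true := by decide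
      simp only [hp, if_pos, PySem.Chars.split₀.go, hs]
      by_cases hb : buf.isEmpty
      · have hbe : buf = [] := List.isEmpty_iff.mp hb
        subst hbe
        simpa using ih [] toks
      · have hbne : buf.reverse.isEmpty = false := by
          simp [List.isEmpty_iff] at hb ⊢; exact hb
        simp only [hbne, Bool.false_eq_true, if_false, hb, List.reverse_reverse]
        have := ih [] (toks ++ [String.ofList buf])
        simp only [List.map_append, List.map_cons, List.map_nil, List.reverse_append,
          List.reverse_cons, List.reverse_nil, List.nil_append, List.cons_append] at this ⊢
        simpa using this
    · by_cases hsp : PySem.Chars.isspace c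
      · simp only [hp, if_neg, not_false_iff, PySem.Chars.split₀.go, hsp, if_true, Bool.or_true]
        by_cases hb : buf.isEmpty
        · have hbe : buf = [] := List.isEmpty_iff.mp hb
          subst hbe
          simpa using ih [] toks
        · have hbne : buf.reverse.isEmpty = false := by
            simp [List.isEmpty_iff] at hb ⊢; exact hb
          simp only [hbne, Bool.false_eq_true, if_false, hb, List.reverse_reverse]
          have := ih [] (toks ++ [String.ofList buf])
          simp only [List.map_append, List.map_cons, List.map_nil, List.reverse_append,
            List.reverse_cons, List.reverse_nil, List.nil_append, List.cons_append] at this ⊢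
          simpa using this
      · simp only [hp, if_neg, not_false_iff, PySem.Chars.split₀.go, hsp,
          Bool.false_eq_true]
        have := ih (buf ++ [c]) toks
        simpa using this

-- ===== VERDICT (by name: the statement is the Claim_ definition above) =====
set_option maxHeartbeats 1000000 in
theorem normalize_text_basic_py_spec : Claim_equal_normalize_text_basic_py := by
  intro value _
  unfold Spec_normalize_text_basic_py
  unfold normalize_text_basic_py normalize_text_basic_py_alt
  simp only [pyNFKD, pyCombining, Bool.not_false, List.filter_true]
  split_ifs with h
  · rfl
  · refine congrArg (PySem.Str.join " ") ?_
    apply List.map_injective_iff.mpr (fun a b hab => String.toList_inj.mp hab)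
    rw [PySem.Str.split₀_map_toList]
    rw [pv_foldl_str_replace_toList]
    rw [← List.foldl_map (f := String.toList)
      (g := fun l cs => PySem.Chars.replace l cs [' '])]
    have htoks : ([".", ",", ";", ":", "'", "\"", "-", "_"] : List String).map String.toList
        = pvPunct.map (fun c => [c]) := by decide
    rw [htoks, List.foldl_map, pv_foldl_replace_eq_map]
    have hol : (String.ofList (PySem.Str.lower (PySem.Str.strip value)).toList).toList
        = (PySem.Str.lower (PySem.Str.strip value)).toList := by simp
    rw [hol]
    have := pv_split_go_eq_altGo (PySem.Str.lower (PySem.Str.strip value)).toList [] []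
    simpa [PySem.Chars.split₀] using this
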